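-- pv_equiv track=rewrite | github.com/mtlong876/EverybodyCodes-solutions | EoE/1/main.py | eni
-- ===== SOURCE A (Python) =====
-- def eni(N,EXP,Mod):
--     score = 1
--     remainders = []
--     for _ in range(EXP):
--        score = (score * N)%Mod
--        remainders.append(score)
--     remainders.reverse()
--     return int("".join(map(str,remainders)))
-- ===== SOURCE B (Python) =====
-- def eni(N, EXP, Mod):
--     # No remainder list, no reversal, no string assembly: a single forward pass
--     # stacks each new remainder arithmetically above the digits accumulated so
--     # far (acc = score * pow10 + acc), where pow10 = 10 ** (digits so far).
--     score, acc, pow10 = 1, 0, 1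
--     k = EXP
--     while k > 0:
--         score = score * N % Mod
--         acc = score * pow10 + acc
--         pow10 *= 10 ** len(str(score))
--         k -= 1
--     return acc
-- ===== Notes on version B (the rewrite author's own statement) =====
-- stated objective: simpler
-- what changed: A collects all remainders in a list, reverses it, joins their str()s and reparses the string with int(); B keeps no list and no string: a single forward while-loop stacks each new remainder arithmetically above the digits accumulated so far (acc = score * 10**width + acc), tracking only the running digit width.
import Mathlib
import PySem

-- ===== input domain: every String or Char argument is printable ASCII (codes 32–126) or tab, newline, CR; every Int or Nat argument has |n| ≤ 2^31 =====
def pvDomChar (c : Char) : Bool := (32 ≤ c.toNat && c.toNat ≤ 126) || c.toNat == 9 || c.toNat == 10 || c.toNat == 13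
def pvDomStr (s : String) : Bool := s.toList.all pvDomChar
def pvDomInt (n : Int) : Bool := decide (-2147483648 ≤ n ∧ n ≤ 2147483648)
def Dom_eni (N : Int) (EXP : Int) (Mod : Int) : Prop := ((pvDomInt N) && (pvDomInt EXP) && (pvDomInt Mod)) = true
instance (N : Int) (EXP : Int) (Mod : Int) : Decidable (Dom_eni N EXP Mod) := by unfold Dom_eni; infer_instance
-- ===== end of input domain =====

-- B replaces A's list + reverse + string-join + int() reparse by a single forward pass that
-- stacks each remainder arithmetically above the digits accumulated so far (objective: simpler).

-- ===== PORT A =====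
-- literal port of A: loop collecting remainders, reverse, join their str()s, int() the result
-- (int(...) is ofStr?; it is none exactly where Python raises ValueError — excluded by Pre_eni)
def eni (N : Int) (EXP : Int) (Mod : Int) : Int :=
  let st := (PySem.List.pyRange 0 EXP 1).foldl
      (fun (st : Int × List Int) _ =>
        let score := PySem.Int.mod (st.1 * N) Mod
        (score, st.2 ++ [score]))
      (1, [])
  let remainders := st.2.reverse
  (PySem.Int.ofStr? (PySem.Str.join "" (remainders.map PySem.Int.toStr))).getD 0

-- ===== PORT B =====
-- literal port of Source B's while-loop as structural recursion on the remaining count k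
-- (k = EXP.toNat: the loop runs while k > 0, i.e. not at all when EXP ≤ 0)
def eniAltGo (N : Int) (Md : Int) : Nat → Int → Int → Int → Int
  | 0, _, acc, _ => acc
  | k + 1, score, acc, pow10 =>
    let s := PySem.Int.mod (score * N) Md
    eniAltGo N Md k s (s * pow10 + acc)
      (pow10 * 10 ^ (PySem.Str.len (PySem.Int.toStr s)).toNat)

def eni_alt (N : Int) (EXP : Int) (Mod : Int) : Int :=
  eniAltGo N Mod EXP.toNat 1 0 1

-- ===== PRECONDITION & SPEC =====
-- Pre_eni = exactly the inputs where A returns: the loop must run (EXP ≥ 1), Mod ≠ 0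
-- (Python % by 0 raises), and the joined string must parse as an int — for Mod > 0 always;
-- for Mod < 0 only when EXP = 1 (a single, possibly negative remainder) or Mod ∣ N (all
-- remainders are 0); otherwise a negative remainder lands mid-string and int() raises.
def Pre_eni (N : Int) (EXP : Int) (Mod : Int) : Prop :=
  1 ≤ EXP ∧ Mod ≠ 0 ∧ (0 < Mod ∨ EXP = 1 ∨ Mod ∣ N)
instance (N : Int) (EXP : Int) (Mod : Int) : Decidable (Pre_eni N EXP Mod) := by
  unfold Pre_eni; infer_instance
def pvWitness_eni : Int × Int × Int := (3, 4, 10)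

def Spec_eni (N : Int) (EXP : Int) (Mod : Int) (out : Int) : Prop := out = eni_alt N EXP Mod
instance (N : Int) (EXP : Int) (Mod : Int) (out : Int) : Decidable (Spec_eni N EXP Mod out) := by
  unfold Spec_eni; infer_instance

-- ===== CLAIM (what is proved, stated in full; the proofs are below) =====
def Claim_equal_eni : Prop := ∀ (N : Int) (EXP : Int) (Mod : Int), Dom_eni N EXP Mod → Pre_eni N EXP Mod → Spec_eni N EXP Mod (eni N EXP Mod)

-- ===== LEMMAS AND PROOFS =====

-- digit characters are not int()-whitespace
theorem digit_not_space (c : Char) (hc : c.isDigit = true) : PySem.Int.isIntSpace c = false := by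
  unfold PySem.Int.isIntSpace
  unfold Char.isDigit at hc
  simp only [Bool.and_eq_true, decide_eq_true_eq] at hc
  simp only [Bool.or_eq_false_iff, decide_eq_false_iff_not, Char.ext_iff]
  refine ⟨⟨⟨⟨⟨?_,?_⟩,?_⟩,?_⟩,?_⟩,?_⟩ <;>
    (intro h; simp [UInt32.le_iff_toNat_le, UInt32.ext_iff] at hc h ⊢; omega)

-- decimal value of a digit string, read left to right starting from acc
def decValN (p : List Char) (acc : Nat) : Nat := p.foldl (fun a c => a * 10 + (c.toNat - '0'.toNat)) acc

theorem decValN_append (p q : List Char) (acc : Nat) :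
    decValN (p ++ q) acc = decValN q (decValN p acc) := by
  simp [decValN, List.foldl_append]

theorem decValN_shift (p : List Char) : ∀ acc : Nat,
    decValN p acc = acc * 10 ^ p.length + decValN p 0 := by
  induction p with
  | nil => intro acc; simp [decValN]
  | cons c p ih =>
    intro acc
    show decValN p (acc * 10 + (c.toNat - '0'.toNat)) = _
    rw [ih (acc * 10 + (c.toNat - '0'.toNat))]
    have h2 : decValN (c :: p) 0 = decValN p (c.toNat - '0'.toNat) := by
      simp [decValN, List.foldl]
    rw [h2, ih (c.toNat - '0'.toNat)]
    simp [List.length_cons, pow_succ]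
    ring

theorem dropWhile_not_head (x : Char) (xs : List Char) (hx : PySem.Int.isIntSpace x = false) :
    List.dropWhile PySem.Int.isIntSpace (x :: xs) = x :: xs := by
  simp [hx]

-- int()'s whitespace stripping is the identity when first and last characters are not spaces
theorem preprocess_id (x : Char) (xs : List Char) (hx : PySem.Int.isIntSpace x = false)
    (hl : PySem.Int.isIntSpace ((x :: xs).getLast (by simp)) = false) :
    (List.dropWhile PySem.Int.isIntSpace
      (List.dropWhile PySem.Int.isIntSpace (x :: xs)).reverse).reverse = x :: xs := by
  rw [dropWhile_not_head x xs hx]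
  obtain ⟨r, rs, hr⟩ : ∃ r rs, (x :: xs).reverse = r :: rs := by
    cases h : (x :: xs).reverse with
    | nil => exact absurd h (by simp)
    | cons a l => exact ⟨a, l, rfl⟩
  have hrlast : r = (x :: xs).getLast (by simp) := by
    rw [← List.head_reverse (l := x :: xs) (by simp)]
    simp [hr]
  rw [hr, dropWhile_not_head r rs (hrlast ▸ hl), ← hr, List.reverse_reverse]

theorem parse_digits (c : Char) (cs : List Char) (hd : ∀ x ∈ c :: cs, x.isDigit = true) :
    PySem.Int.ofChars? (c :: cs) = some ((decValN (c :: cs) 0 : Nat) : Int) := by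
  have hlastd : ((c :: cs).getLast (by simp)).isDigit = true :=
    hd _ (List.getLast_mem _)
  unfold PySem.Int.ofChars?
  simp only [preprocess_id c cs (digit_not_space c (hd c (by simp))) (digit_not_space _ hlastd)]
  split
  · rename_i ds heq
    injection heq with h1 h2; subst h1
    simpa using hd '-' (by simp)
  · rename_i ds heq
    injection heq with h1 h2; subst h1
    simpa using hd '+' (by simp)
  · rename_i hcs2 hneg hpos
    have hmb : ∀ (x : Option Nat),
        (Option.map (fun n : Int => n) do
          let a ← x
          pure (↑a : Int)) = Option.map (fun a : Nat => (↑a : Int)) x := by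
      intro x; cases x <;> rfl
    rw [hmb, Option.map_eq_some_iff]
    refine ⟨decValN (c :: cs) 0, ?_, rfl⟩
    conv_lhs => whnf
    have hc : c.isDigit = true := hd c (by simp)
    rw [show (instDecidableEqBool c.isDigit true) = .isTrue hc from Subsingleton.elim _ _]
    conv_lhs => whnf
    simp only [decValN, List.foldl]
    have hcs : ∀ x ∈ cs, x.isDigit = true := fun x hx => hd x (List.mem_cons_of_mem c hx)
    clear hd hneg hpos hcs2 hmb hlastd
    generalize 0 * 10 + (c.toNat - '0'.toNat) = acc
    induction cs generalizing acc with
    | nil => rfl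
    | cons d cs' ih =>
      have hd' : d.isDigit = true := hcs d (by simp)
      conv_lhs => whnf
      rw [show (instDecidableEqBool d.isDigit true) = .isTrue hd' from Subsingleton.elim _ _]
      conv_lhs => whnf
      simp only [List.foldl]
      exact ih (fun x hx => hcs x (List.mem_cons_of_mem d hx)) _

theorem parse_neg (c : Char) (cs : List Char) (hd : ∀ x ∈ c :: cs, x.isDigit = true) :
    PySem.Int.ofChars? ('-' :: c :: cs) = some (-((decValN (c :: cs) 0 : Nat) : Int)) := by
  have hlastd : (('-' :: c :: cs).getLast (by simp)).isDigit = true := by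
    rw [List.getLast_cons (by simp)]
    exact hd _ (List.getLast_mem _)
  unfold PySem.Int.ofChars?
  simp only [preprocess_id '-' (c :: cs) (by decide) (digit_not_space _ hlastd)]
  · have hmb : ∀ (x : Option Nat),
        (Option.map (fun n : Int => -n) do
          let a ← x
          pure (↑a : Int)) = Option.map (fun a : Nat => -(↑a : Int)) x := by
      intro x; cases x <;> rfl
    rw [hmb, Option.map_eq_some_iff]
    refine ⟨decValN (c :: cs) 0, ?_, rfl⟩
    conv_lhs => whnf
    have hc : c.isDigit = true := hd c (by simp)
    rw [show (instDecidableEqBool c.isDigit true) = .isTrue hc from Subsingleton.elim _ _]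
    conv_lhs => whnf
    simp only [decValN, List.foldl]
    have hcs : ∀ x ∈ cs, x.isDigit = true := fun x hx => hd x (List.mem_cons_of_mem c hx)
    clear hd hlastd
    generalize 0 * 10 + (c.toNat - '0'.toNat) = acc
    induction cs generalizing acc with
    | nil => rfl
    | cons d cs' ih =>
      have hd' : d.isDigit = true := hcs d (by simp)
      conv_lhs => whnf
      rw [show (instDecidableEqBool d.isDigit true) = .isTrue hd' from Subsingleton.elim _ _]
      conv_lhs => whnf
      simp only [List.foldl]
      exact ih (fun x hx => hcs x (List.mem_cons_of_mem d hx)) _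

-- ---- decimal digits of a Nat, and Nat.toDigits semantics ----
def myDigits (n : Nat) : List Char :=
  if n < 10 then [Nat.digitChar n] else myDigits (n / 10) ++ [Nat.digitChar (n % 10)]
  decreasing_by exact Nat.div_lt_self (by omega) (by omega)

theorem toDigitsCore_eq (f : Nat) : ∀ (n : Nat) (ds : List Char), n < f →
    Nat.toDigitsCore 10 f n ds = myDigits n ++ ds := by
  induction f with
  | zero => intro n ds h; omega
  | succ f ih =>
    intro n ds h
    show (let d := (n % 10).digitChar; let n' := n / 10;
          if n' = 0 then d :: ds else Nat.toDigitsCore 10 f n' (d :: ds)) = _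
    by_cases h10 : n / 10 = 0
    · simp only [h10, if_pos]
      rw [myDigits]
      have hn : n < 10 := by omega
      simp [hn, Nat.mod_eq_of_lt hn]
    · simp only [h10]
      rw [ih (n / 10) _ (by omega)]
      conv_rhs => rw [myDigits]
      have hn : ¬ n < 10 := by omega
      simp [hn]

theorem toDigits_eq (n : Nat) : Nat.toDigits 10 n = myDigits n := by
  simpa using toDigitsCore_eq (n + 1) n [] (by omega)

theorem myDigits_ne_nil (n : Nat) : myDigits n ≠ [] := by
  rw [myDigits]; split <;> simp

theorem digitChar_isDigit (m : Nat) (h : m < 10) : (Nat.digitChar m).isDigit = true := by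
  interval_cases m <;> decide

theorem myDigits_digits (n : Nat) : ∀ c ∈ myDigits n, c.isDigit = true := by
  induction n using Nat.strong_induction_on with
  | _ n ih =>
    rw [myDigits]
    split
    · intro c hc; simp at hc; subst hc; exact digitChar_isDigit n (by omega)
    · intro c hc
      rw [List.mem_append] at hc
      rcases hc with hc | hc
      · exact ih (n / 10) (Nat.div_lt_self (by omega) (by omega)) c hc
      · simp at hc; subst hc; exact digitChar_isDigit (n % 10) (by omega)

theorem digitChar_toNat (m : Nat) (h : m < 10) : (Nat.digitChar m).toNat - 48 = m := by
  interval_cases m <;> decide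

theorem decValN_myDigits (n : Nat) : ∀ acc, decValN (myDigits n) acc = acc * 10 ^ (myDigits n).length + n := by
  induction n using Nat.strong_induction_on with
  | _ n ih =>
    intro acc
    rw [myDigits]
    split
    · rename_i h
      simp [decValN, digitChar_toNat n h]
    · rename_i h
      rw [decValN_append, ih (n / 10) (Nat.div_lt_self (by omega) (by omega))]
      simp [decValN, digitChar_toNat (n % 10) (by omega), List.length_append, pow_succ]
      have := Nat.div_add_mod n 10
      ring_nf
      omega

-- str(r) for r ≥ 0 is the digit list of r
theorem toChars_nonneg (r : Int) (hr : 0 ≤ r) : PySem.Int.toChars r = myDigits r.toNat := by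
  unfold PySem.Int.toChars
  rw [if_neg (by omega), toDigits_eq]

theorem toChars_neg (r : Int) (hr : r < 0) : PySem.Int.toChars r = '-' :: myDigits r.natAbs := by
  unfold PySem.Int.toChars
  rw [if_pos hr, toDigits_eq]

-- int(str(r)) = r
theorem parse_toChars (r : Int) : PySem.Int.ofChars? (PySem.Int.toChars r) = some r := by
  by_cases hr : 0 ≤ r
  · rw [toChars_nonneg r hr]
    obtain ⟨c, cs, hc⟩ : ∃ c cs, myDigits r.toNat = c :: cs := by
      cases h : myDigits r.toNat with
      | nil => exact absurd h (myDigits_ne_nil _)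
      | cons a l => exact ⟨a, l, rfl⟩
    rw [hc, parse_digits c cs (fun x hx => myDigits_digits _ x (hc ▸ hx))]
    have hv := decValN_myDigits r.toNat 0
    rw [hc] at hv
    rw [hv]
    refine congrArg some ?_
    simp only [zero_mul, zero_add]
    omega
  · rw [toChars_neg r (by omega)]
    obtain ⟨c, cs, hc⟩ : ∃ c cs, myDigits r.natAbs = c :: cs := by
      cases h : myDigits r.natAbs with
      | nil => exact absurd h (myDigits_ne_nil _)
      | cons a l => exact ⟨a, l, rfl⟩
    rw [hc, parse_neg c cs (fun x hx => myDigits_digits _ x (hc ▸ hx))]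
    have hv := decValN_myDigits r.natAbs 0
    rw [hc] at hv
    rw [hv]
    refine congrArg some ?_
    simp only [zero_mul, zero_add]
    omega

-- ---- the two loops, characterized ----
def pvScore (N Md : Int) : Nat → Int
  | 0 => 1
  | k + 1 => PySem.Int.mod (pvScore N Md k * N) Md

def pvRems (N Md : Int) : Nat → List Int
  | 0 => []
  | k + 1 => pvRems N Md k ++ [pvScore N Md (k + 1)]

def pvAcc (N Md : Int) : Nat → Int × Int
  | 0 => (0, 1)
  | k + 1 =>
    let prev := pvAcc N Md k
    let s := pvScore N Md (k + 1)
    (s * prev.2 + prev.1, prev.2 * 10 ^ (PySem.Str.len (PySem.Int.toStr s)).toNat)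

theorem foldA (N Md : Int) (k : Nat) :
    (PySem.List.pyRange 0 (k : Int) 1).foldl
      (fun (st : Int × List Int) _ =>
        let score := PySem.Int.mod (st.1 * N) Md
        (score, st.2 ++ [score]))
      (1, []) = (pvScore N Md k, pvRems N Md k) := by
  induction k with
  | zero => simp [pvScore, pvRems]
  | succ k ih =>
    push_cast
    rw [PySem.List.pyRange_one_succ_right (by positivity), List.foldl_append, ih]
    simp [pvScore, pvRems]

-- B's countdown recursion, started anywhere along the run, lands on pvAcc
theorem goB (N Md : Int) (fuel : Nat) : ∀ j : Nat,
    eniAltGo N Md fuel (pvScore N Md j) (pvAcc N Md j).1 (pvAcc N Md j).2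
      = (pvAcc N Md (j + fuel)).1 := by
  induction fuel with
  | zero => intro j; simp [eniAltGo]
  | succ fuel ih =>
    intro j
    show eniAltGo N Md fuel (PySem.Int.mod (pvScore N Md j * N) Md) _ _ = _
    have hs : PySem.Int.mod (pvScore N Md j * N) Md = pvScore N Md (j + 1) := rfl
    have h1 : pvScore N Md (j + 1) * (pvAcc N Md j).2 + (pvAcc N Md j).1
        = (pvAcc N Md (j + 1)).1 := rfl
    have h2 : (pvAcc N Md j).2 * 10 ^ (PySem.Str.len (PySem.Int.toStr (pvScore N Md (j + 1)))).toNat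
        = (pvAcc N Md (j + 1)).2 := rfl
    rw [hs, h1, h2, ih (j + 1), show j + 1 + fuel = j + (fuel + 1) from by omega]

-- the joined string after k steps
def pvStr (N Md : Int) (k : Nat) : List Char :=
  ((pvRems N Md k).reverse.map PySem.Int.toChars).flatten

theorem join_empty_sep (xss : List (List Char)) : PySem.Chars.join [] xss = xss.flatten := by
  induction xss with
  | nil => rfl
  | cons a l ih =>
    cases l with
    | nil => simp [PySem.Chars.join, List.intercalate]
    | cons b m =>
      simp only [PySem.Chars.join, List.intercalate, List.intersperse] at *
      simp_all

-- A's return value in terms of pvStr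
theorem eni_eq_parse (N Md : Int) (k : Nat) :
    eni N (k : Int) Md = (PySem.Int.ofChars? (pvStr N Md k)).getD 0 := by
  unfold eni
  rw [foldA N Md k]
  simp only [PySem.Int.ofStr?.eq_1, PySem.Str.toList_join]
  congr 1
  rw [show ("" : String).toList = [] from rfl, join_empty_sep]
  unfold pvStr
  congr 1
  simp [Function.comp_def, PySem.Int.toList_toStr, List.map_reverse]

theorem eni_alt_eq_acc (N Md : Int) (k : Nat) :
    eni_alt N (k : Int) Md = (pvAcc N Md k).1 := by
  unfold eni_alt
  have h0 : ((k : Int)).toNat = k := by omega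
  rw [h0]
  have := goB N Md k 0
  simpa [pvScore, pvAcc] using this

-- invariant: under nonnegative remainders, pvAcc tracks length and decimal value of pvStr
theorem invariant (N Md : Int) (k : Nat)
    (hnn : ∀ i, 1 ≤ i → i ≤ k → 0 ≤ pvScore N Md i) :
    (∀ c ∈ pvStr N Md k, c.isDigit = true) ∧
    (pvAcc N Md k).2 = (10 : Int) ^ (pvStr N Md k).length ∧
    (pvAcc N Md k).1 = ((decValN (pvStr N Md k) 0 : Nat) : Int) := by
  induction k with
  | zero => refine ⟨by simp [pvStr, pvRems], by simp [pvAcc, pvStr, pvRems], by simp [pvAcc, pvStr, pvRems, decValN]⟩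
  | succ k ih =>
    obtain ⟨ihd, ihw, iha⟩ := ih (fun i h1 h2 => hnn i h1 (by omega))
    have hr : 0 ≤ pvScore N Md (k + 1) := hnn (k + 1) (by omega) (by omega)
    have hSk : pvStr N Md (k + 1) = PySem.Int.toChars (pvScore N Md (k + 1)) ++ pvStr N Md k := by
      simp [pvStr, pvRems, List.reverse_append]
    have hchars : PySem.Int.toChars (pvScore N Md (k + 1)) = myDigits (pvScore N Md (k + 1)).toNat :=
      toChars_nonneg _ hr
    refine ⟨?_, ?_, ?_⟩
    · intro c hc
      rw [hSk, List.mem_append] at hc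
      rcases hc with hc | hc
      · rw [hchars] at hc; exact myDigits_digits _ c hc
      · exact ihd c hc
    · show (pvAcc N Md k).2 * 10 ^ (PySem.Str.len (PySem.Int.toStr (pvScore N Md (k + 1)))).toNat = _
      rw [ihw, hSk, PySem.Str.len_eq, PySem.Int.toList_toStr]
      simp [List.length_append, pow_add]
      ring
    · show pvScore N Md (k + 1) * (pvAcc N Md k).2 + (pvAcc N Md k).1 = _
      rw [hSk, decValN_append, hchars, decValN_myDigits, zero_mul, zero_add]
      conv_rhs => rw [decValN_shift]
      rw [iha, ihw]
      push_cast
      rw [Int.toNat_of_nonneg hr]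

-- the string is nonempty for k ≥ 1
theorem pvStr_cons (N Md : Int) (k : Nat) (hk : 1 ≤ k) :
    ∃ c cs, pvStr N Md k = c :: cs := by
  obtain ⟨k', rfl⟩ : ∃ k', k = k' + 1 := ⟨k - 1, by omega⟩
  simp only [pvStr, pvRems, List.reverse_append, List.map_append, List.map_cons, List.reverse_cons]
  simp
  obtain ⟨c, cs, hc⟩ : ∃ c cs, PySem.Int.toChars (pvScore N Md (k' + 1)) = c :: cs := by
    unfold PySem.Int.toChars
    split
    · exact ⟨'-', _, rfl⟩
    · rw [toDigits_eq]
      cases h : myDigits (pvScore N Md (k' + 1)).toNat with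
      | nil => exact absurd h (myDigits_ne_nil _)
      | cons a l => exact ⟨a, l, rfl⟩
  rw [hc]
  exact ⟨c, _, rfl⟩

-- all remainders are 0 when Mod ∣ N
theorem score_zero (N Md : Int) (hdvd : Md ∣ N) : ∀ i, 1 ≤ i → pvScore N Md i = 0 := by
  intro i hi
  induction i with
  | zero => omega
  | succ i ih =>
    cases Nat.eq_zero_or_pos i with
    | inl h => subst h; show PySem.Int.mod (1 * N) Md = 0; rw [one_mul, PySem.Int.mod_eq_zero_iff_dvd]; exact hdvd
    | inr h =>
      show PySem.Int.mod (pvScore N Md i * N) Md = 0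
      rw [ih (by omega), zero_mul]
      rw [PySem.Int.mod_eq_zero_iff_dvd]
      exact dvd_zero Md

set_option maxHeartbeats 1000000 in
theorem main_nonneg (N EXP Md : Int) (h1 : 1 ≤ EXP)
    (hnn : ∀ i, 1 ≤ i → i ≤ EXP.toNat → 0 ≤ pvScore N Md i) :
    eni N EXP Md = eni_alt N EXP Md := by
  obtain ⟨hd, hw, ha⟩ := invariant N Md EXP.toNat hnn
  obtain ⟨c, cs, hc⟩ := pvStr_cons N Md EXP.toNat (by omega)
  have hE : ((EXP.toNat : Nat) : Int) = EXP := by omega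
  rw [← hE, eni_eq_parse N Md EXP.toNat, eni_alt_eq_acc N Md EXP.toNat, hc,
    parse_digits c cs (fun x hx => hd x (hc ▸ hx))]
  rw [ha, hc]
  rfl

-- ===== VERDICT (by name: the statement is the Claim_ definition above) =====
set_option maxHeartbeats 1000000 in
theorem eni_spec : Claim_equal_eni := by
  intro N EXP Md _ hpre
  obtain ⟨h1, hmod, hcase⟩ := hpre
  unfold Spec_eni
  rcases hcase with hpos | hone | hdvd
  · exact (main_nonneg N EXP Md h1 (fun i hi _ => by
      cases i with
      | zero => omega
      | succ i => exact PySem.Int.mod_nonneg _ hpos))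
  · -- EXP = 1 : a single remainder, any sign
    subst hone
    have h1' : (1 : Int) = ((1 : Nat) : Int) := by norm_num
    rw [h1', eni_eq_parse N Md 1, eni_alt_eq_acc N Md 1]
    have hstr : pvStr N Md 1 = PySem.Int.toChars (pvScore N Md 1) := by
      simp [pvStr, pvRems]
    rw [hstr, parse_toChars]
    show pvScore N Md 1 = pvScore N Md 1 * 1 + 0
    simp
  · exact (main_nonneg N EXP Md h1 (fun i hi _ => by
      rw [score_zero N Md hdvd i hi]))
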